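-- pv_equiv track=rewrite | github.com/Empiire00/advent-of-code-2023 | src/day-13/main.py | find_horizontal_pattern_mirrors
-- ===== SOURCE A (Python) =====
-- def find_horizontal_pattern_mirrors(pattern: list[str], differences: int = 0) -> list[int]:
--     above_reversed = []
--     below = pattern.copy()
--     mirrors: list[int] = []
--     position = 0
--     while len(below) > 1:
--         above_reversed.insert(0, below.pop(0))
--         position += 1
--         # it is always true that
--         # above_reversed[::-1] + below == pattern
--
--         above_reversed_trimmed = above_reversed[:len(below):]
--         below_trimmed = below[:len(above_reversed)]
--         diffs: list[int] = []
--         for line_a, line_b in zip(above_reversed_trimmed, below_trimmed):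
--             line_diff = sum(a != b for a, b in zip(line_a, line_b))
--             diffs.append(line_diff)
--
--         if sum(diffs) == differences:
--             mirrors.append(position)
--
--     return mirrors
-- ===== SOURCE B (Python) =====
-- def find_horizontal_pattern_mirrors(pattern: list[str], differences: int = 0) -> list[int]:
--     n = len(pattern)
--
--     def total(p: int) -> int:
--         return sum(
--             sum(a != b for a, b in zip(pattern[p - 1 - k], pattern[p + k]))
--             for k in range(min(p, n - p))
--         )
--
--     return [p for p in range(1, n) if total(p) == differences]
-- ===== Notes on version B (the rewrite author's own statement) =====
-- stated objective: simpler
-- what changed: B drops A's mutated above_reversed/below list bookkeeping (pop/insert/copy/trim each iteration) and instead, for each candidate position p, sums per-row character differences by direct index arithmetic into the unmodified pattern, emitting matching positions with a range comprehension.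
import Mathlib
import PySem

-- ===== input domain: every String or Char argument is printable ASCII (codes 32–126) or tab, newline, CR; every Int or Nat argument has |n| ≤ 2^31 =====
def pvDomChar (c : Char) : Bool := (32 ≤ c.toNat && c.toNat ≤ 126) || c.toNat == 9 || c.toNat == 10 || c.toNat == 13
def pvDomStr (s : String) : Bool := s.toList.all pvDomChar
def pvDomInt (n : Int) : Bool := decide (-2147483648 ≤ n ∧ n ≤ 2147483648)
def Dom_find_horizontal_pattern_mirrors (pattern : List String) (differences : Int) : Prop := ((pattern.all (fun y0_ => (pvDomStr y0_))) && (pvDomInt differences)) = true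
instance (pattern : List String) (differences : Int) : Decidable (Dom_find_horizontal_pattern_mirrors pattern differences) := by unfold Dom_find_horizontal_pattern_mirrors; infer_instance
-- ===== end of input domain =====

-- B drops A's above_reversed/below list bookkeeping and, for each candidate position,
-- sums per-row character differences by direct index arithmetic into the unmodified
-- pattern (objective: simpler; same asymptotic cost).

-- shared row helper: sum(a != b for a, b in zip(line_a, line_b)) — identical expression in A and B
def lineDiff (la lb : String) : Int :=
  ((la.toList.zip lb.toList).map (fun pr => if pr.1 ≠ pr.2 then (1 : Int) else 0)).sum

-- ===== PORT A =====
-- the while-loop of A: state (above_reversed, below, mirrors, position)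
def findLoopA (differences : Int) (above_reversed below : List String)
    (mirrors : List Int) (position : Int) : List Int :=
  match below with
  | [] => mirrors
  | [_] => mirrors          -- len(below) > 1 fails
  | b0 :: rest =>
    let above' := b0 :: above_reversed        -- above_reversed.insert(0, below.pop(0))
    let position' := position + 1
    let above_trimmed := above'.take rest.length
    let below_trimmed := rest.take above'.length
    let diffs := (above_trimmed.zip below_trimmed).map (fun pr => lineDiff pr.1 pr.2)
    let mirrors' := if diffs.sum = differences then mirrors ++ [position'] else mirrors
    findLoopA differences above' rest mirrors' position'

def find_horizontal_pattern_mirrors (pattern : List String) (differences : Int) : List Int :=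
  findLoopA differences [] pattern [] 0

-- ===== PORT B =====
-- total(p): sum over k in range(min(p, n - p)); indices are always in range, so
-- pattern[i] is ported as getD with the (never used) default ""
def totalB (pattern : List String) (n p : Int) : Int :=
  ((PySem.List.pyRange 0 (min p (n - p)) 1).map
    (fun k => lineDiff (pattern.getD (p - 1 - k).toNat "") (pattern.getD (p + k).toNat ""))).sum

def find_horizontal_pattern_mirrors_alt (pattern : List String) (differences : Int) : List Int :=
  (PySem.List.pyRange 1 (pattern.length : Int) 1).filter
    (fun p => totalB pattern (pattern.length : Int) p == differences)

-- ===== PRECONDITION & SPEC =====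
def Spec_find_horizontal_pattern_mirrors (pattern : List String) (differences : Int) (out : List Int) : Prop := out = find_horizontal_pattern_mirrors_alt pattern differences
instance (pattern : List String) (differences : Int) (out : List Int) : Decidable (Spec_find_horizontal_pattern_mirrors pattern differences out) := by unfold Spec_find_horizontal_pattern_mirrors; infer_instance

-- ===== CLAIM (what is proved, stated in full; the proofs are below) =====
def Claim_equal_find_horizontal_pattern_mirrors : Prop := ∀ (pattern : List String) (differences : Int), Dom_find_horizontal_pattern_mirrors pattern differences → Spec_find_horizontal_pattern_mirrors pattern differences (find_horizontal_pattern_mirrors pattern differences)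

-- ===== LEMMAS AND PROOFS =====

lemma zip_take_take {α : Type} : ∀ (A B : List α),
    (A.take B.length).zip (B.take A.length) = A.zip B := by
  intro A
  induction A with
  | nil => intro B; simp
  | cons a as ih =>
    intro B
    cases B with
    | nil => simp
    | cons b bs => simp [ih bs]

-- the zip-of-takes sum that A computes at position p = A.length equals B's total(p)
lemma getD_mirror {α β : Type} (f : α → α → β) (d : α) (A B : List α) :
    (List.range (min A.length B.length)).map
      (fun k => f ((A.reverse ++ B).getD (A.length - 1 - k) d) ((A.reverse ++ B).getD (A.length + k) d))
    = (A.zip B).map (fun pr => f pr.1 pr.2) := by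
  apply List.ext_getElem
  · simp
  · intro i h1 h2
    have hiA : i < A.length := by simp at h1; omega
    have hiB : i < B.length := by simp at h1; omega
    rw [List.getElem_map, List.getElem_map, List.getElem_range, List.getElem_zip]
    rw [List.getD_eq_getElem _ _ (by simp only [List.length_append, List.length_reverse]; omega : A.length - 1 - i < (A.reverse ++ B).length)]
    rw [List.getD_eq_getElem _ _ (by simp only [List.length_append, List.length_reverse]; omega : A.length + i < (A.reverse ++ B).length)]
    rw [List.getElem_append_left (by simp only [List.length_reverse]; omega : A.length - 1 - i < A.reverse.length)]
    rw [List.getElem_append_right (by simp only [List.length_reverse]; omega : A.reverse.length ≤ A.length + i)]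
    rw [List.getElem_reverse]
    have e1 : A.length - 1 - (A.length - 1 - i) = i := by omega
    have e2 : A.length + i - A.reverse.length = i := by simp only [List.length_reverse]; omega
    simp only [e1, e2]

lemma zip_sum_eq_totalB (A B : List String) :
    (((A.take B.length).zip (B.take A.length)).map (fun pr => lineDiff pr.1 pr.2)).sum
    = totalB (A.reverse ++ B) ((A.length : Int) + (B.length : Int)) (A.length : Int) := by
  rw [zip_take_take]
  unfold totalB
  have hmin : min (A.length : Int) (((A.length : Int) + (B.length : Int)) - (A.length : Int))
      = ((min A.length B.length : Nat) : Int) := by push_cast; omega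
  rw [hmin, PySem.List.pyRange_one]
  have hm : (((min A.length B.length : Nat) : Int) - 0).toNat = min A.length B.length := by omega
  rw [hm, List.map_map]
  refine congrArg List.sum ?_
  have step1 : ∀ k ∈ List.range (min A.length B.length),
      ((fun kk => lineDiff ((A.reverse ++ B).getD ((A.length : Int) - 1 - kk).toNat "")
          ((A.reverse ++ B).getD ((A.length : Int) + kk).toNat "")) ∘ (fun kk : ℕ => (0 : Int) + kk)) k
      = (fun kk : ℕ => lineDiff ((A.reverse ++ B).getD (A.length - 1 - kk) "")
          ((A.reverse ++ B).getD (A.length + kk) "")) k := by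
    intro k hk
    rw [List.mem_range] at hk
    have hkA : k < A.length := by omega
    simp only [Function.comp]
    have e1 : ((A.length : Int) - 1 - ((0 : Int) + (k : Nat))).toNat = A.length - 1 - k := by omega
    have e2 : ((A.length : Int) + ((0 : Int) + (k : Nat))).toNat = A.length + k := by omega
    rw [e1, e2]
  rw [List.map_congr_left step1]
  exact (getD_mirror lineDiff "" A B).symm

lemma loop_eq (d : Int) : ∀ (below above : List String) (mirrors : List Int),
    findLoopA d above below mirrors (above.length : Int)
    = mirrors ++ (PySem.List.pyRange ((above.length : Int) + 1)
        ((above.length : Int) + (below.length : Int)) 1).filter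
        (fun p => totalB (above.reverse ++ below)
          ((above.length : Int) + (below.length : Int)) p == d) := by
  intro below
  induction below with
  | nil =>
    intro above mirrors
    rw [PySem.List.pyRange_one_eq_nil (by push_cast [List.length_nil]; omega)]
    simp [findLoopA]
  | cons b0 tail ih =>
    intro above mirrors
    cases tail with
    | nil =>
      rw [PySem.List.pyRange_one_eq_nil (by push_cast [List.length_cons, List.length_nil]; omega)]
      simp [findLoopA]
    | cons b1 rest =>
      have hcast : (((b0 :: above).length : Nat) : Int) = (above.length : Int) + 1 := by
        push_cast [List.length_cons]; ring
      have hn2 : (((b0 :: above).length : Nat) : Int) + (((b1 :: rest).length : Nat) : Int)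
          = (above.length : Int) + (((b0 :: b1 :: rest).length : Nat) : Int) := by
        push_cast [List.length_cons]; ring
      have hpat : (b0 :: above).reverse ++ (b1 :: rest) = above.reverse ++ (b0 :: b1 :: rest) := by
        simp
      have ih' := ih (b0 :: above)
      rw [hpat, hn2, hcast] at ih'
      have hsum := zip_sum_eq_totalB (b0 :: above) (b1 :: rest)
      rw [hpat, hn2, hcast] at hsum
      simp only [findLoopA]
      rw [ih']
      have h1 : (above.length : Int) + 1 < (above.length : Int) + (((b0 :: b1 :: rest).length : Nat) : Int) := by
        simp only [List.length_cons]; push_cast; omega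
      conv_rhs => rw [PySem.List.pyRange_one_cons h1]
      simp only [List.filter_cons, beq_iff_eq]
      rw [← hsum]
      by_cases hd : ((((b0 :: above).take (b1 :: rest).length).zip
          ((b1 :: rest).take (b0 :: above).length)).map (fun pr => lineDiff pr.1 pr.2)).sum = d
      · rw [if_pos hd, if_pos hd]
        simp
      · rw [if_neg hd, if_neg hd]

-- ===== VERDICT (by name: the statement is the Claim_ definition above) =====
theorem find_horizontal_pattern_mirrors_spec : Claim_equal_find_horizontal_pattern_mirrors := by
  intro pattern differences _
  unfold Spec_find_horizontal_pattern_mirrors find_horizontal_pattern_mirrors find_horizontal_pattern_mirrors_alt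
  have h := loop_eq differences pattern [] []
  simp only [List.length_nil, Nat.cast_zero, zero_add, List.reverse_nil, List.nil_append] at h
  exact h
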